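-- pv_equiv track=rewrite | github.com/MrBrantCode/unitest_baseline | mut_generate/mist_train_cf/cf_11195/solution.py | find_first_non_repeating_vowel
-- ===== SOURCE A (Python) =====
-- def find_first_non_repeating_vowel(s):
--     vowel_count = {}
--     vowels = []
--
--     for ch in s:
--         if ch in ['a', 'e', 'i', 'o', 'u']:
--             if ch not in vowel_count:
--                 vowel_count[ch] = 1
--             else:
--                 vowel_count[ch] += 1
--             if ch not in vowels:
--                 vowels.append(ch)
--
--     for v in vowels:
--         if vowel_count[v] == 1:
--             return v
--
--     return None
-- ===== SOURCE B (Python) =====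
-- def find_first_non_repeating_vowel(s):
--     for ch in s:
--         if ch in 'aeiou' and s.count(ch) == 1:
--             return ch
--     return None
-- ===== Notes on version B (the rewrite author's own statement) =====
-- stated objective: simpler
-- what changed: B replaces A's dict-plus-ordered-distinct-vowel-list bookkeeping by a single direct scan of s that returns the first vowel occurring exactly once, using s.count(ch) instead of any maintained counting structure.
import Mathlib
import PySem

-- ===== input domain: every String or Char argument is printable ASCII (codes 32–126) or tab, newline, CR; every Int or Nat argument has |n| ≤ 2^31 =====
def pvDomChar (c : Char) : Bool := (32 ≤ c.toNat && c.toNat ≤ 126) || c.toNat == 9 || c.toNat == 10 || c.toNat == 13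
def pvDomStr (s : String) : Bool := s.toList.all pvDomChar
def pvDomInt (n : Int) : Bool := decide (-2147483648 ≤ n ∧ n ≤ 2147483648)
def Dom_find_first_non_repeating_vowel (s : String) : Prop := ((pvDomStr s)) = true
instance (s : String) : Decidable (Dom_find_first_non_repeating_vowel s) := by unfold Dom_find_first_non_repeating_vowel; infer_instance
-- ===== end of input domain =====

-- B drops all of A's bookkeeping (the count dict and the ordered list of distinct vowels):
-- it scans s once and returns the first vowel with s.count(ch) == 1 (objective: simpler).

-- ===== PORT A =====
-- 'vowel_count[v]' in the final loop is read with getD: every v ∈ vowels is a key, so no KeyError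
-- is reachable and the lookup is exact; 'return v'/fall-through is List.find?.
def find_first_non_repeating_vowel (s : String) : Option String :=
  let st := s.toList.foldl
    (fun (acc : PySem.Dict Char Int × List Char) ch =>
      if ch ∈ ['a', 'e', 'i', 'o', 'u'] then
        ((if acc.1.contains ch = false then acc.1.insert ch 1 else acc.1.modify ch 0 (· + 1)),
         (if ch ∈ acc.2 then acc.2 else acc.2 ++ [ch]))
      else acc)
    (PySem.Dict.empty, [])
  match st.2.find? (fun v => st.1.getD v 0 == 1) with
  | some v => some (String.ofList [v])
  | none => none

-- ===== PORT B =====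
-- 'ch in "aeiou"' on a single character is the membership test; 's.count(ch)' is PySem.Str.count.
def find_first_non_repeating_vowel_alt (s : String) : Option String :=
  match s.toList.find?
      (fun ch => decide (ch ∈ ['a', 'e', 'i', 'o', 'u'])
                 && (PySem.Str.count s (String.ofList [ch]) == 1)) with
  | some ch => some (String.ofList [ch])
  | none => none

-- ===== PRECONDITION & SPEC =====
def Spec_find_first_non_repeating_vowel (s : String) (out : Option String) : Prop := out = find_first_non_repeating_vowel_alt s
instance (s : String) (out : Option String) : Decidable (Spec_find_first_non_repeating_vowel s out) := by unfold Spec_find_first_non_repeating_vowel; infer_instance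

-- ===== CLAIM (what is proved, stated in full; the proofs are below) =====
def Claim_equal_find_first_non_repeating_vowel : Prop := ∀ (s : String), Dom_find_first_non_repeating_vowel s → Spec_find_first_non_repeating_vowel s (find_first_non_repeating_vowel s)

-- ===== LEMMAS AND PROOFS =====

-- A's count loop: every lookup equals the running count.
theorem pv_countA (l : List Char) (d : PySem.Dict Char Int) (v : Char) :
    (l.foldl (fun d ch => if d.contains ch = false then d.insert ch 1 else d.modify ch 0 (· + 1)) d).getD v 0
      = d.getD v 0 + (l.count v : Int) := by
  induction l generalizing d with
  | nil => simp
  | cons a t ih =>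
    simp only [List.foldl_cons, List.count_cons]
    cases hc : d.contains a with
    | false =>
      rw [if_pos rfl, ih, PySem.Dict.getD_insert]
      by_cases hv : v = a
      · subst hv
        have h0 : d.getD v (0:Int) = 0 := PySem.Dict.getD_of_not_contains d 0 hc
        simp [h0]
        omega
      · simp [hv, Ne.symm hv]
    | true =>
      rw [if_neg (by simp), ih, PySem.Dict.getD_modify]
      by_cases hv : v = a
      · subst hv
        simp
        omega
      · simp [hv, Ne.symm hv]

-- find? ignores filtering out elements that cannot satisfy the predicate.
theorem pv_find?_filter_imp (l : List Char) (p q : Char → Bool)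
    (h : ∀ y, p y = true → q y = true) : (l.filter q).find? p = l.find? p := by
  induction l with
  | nil => rfl
  | cons a t ih =>
    by_cases hq : q a = true
    · simp only [List.filter_cons, hq, if_true, List.find?_cons]
      cases hp : p a <;> simp [ih]
    · have hp : p a = false := by
        cases hpa : p a
        · rfl
        · exact absurd (h a hpa) (by simpa using hq)
      simp only [List.filter_cons, hq, List.find?_cons, hp]
      simpa [hp] using ih

-- find? over the de-duplicated list equals find? over the list.
theorem pv_find?_ofList (l : List Char) (p : Char → Bool) :
    (PySem.Set.ofList l).find? p = l.find? p := by
  induction l with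
  | nil => rfl
  | cons a t ih =>
    rw [PySem.Set.ofList_cons]
    cases hp : p a with
    | true => simp [hp]
    | false =>
      simp only [List.find?_cons, hp]
      rw [← ih]
      have hd : PySem.Set.discard (PySem.Set.ofList t) a
          = (PySem.Set.ofList t).filter (fun y => y != a) := rfl
      rw [hd]
      exact pv_find?_filter_imp _ p _ (fun y hy => by
        simp only [bne_iff_ne, ne_eq]
        rintro rfl; rw [hp] at hy; exact absurd hy (by simp))

-- Chars.count with a single-character needle is List.count.
theorem pv_go_single (c : Char) (l : List Char) : ∀ (fuel acc : Nat), l.length ≤ fuel →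
    PySem.Chars.count.go [c] fuel l acc = acc + l.count c := by
  induction l with
  | nil => intro fuel acc h; cases fuel <;> simp [PySem.Chars.count.go]
  | cons a t ih =>
    intro fuel acc h
    cases fuel with
    | zero => simp at h
    | succ n =>
      rw [PySem.Chars.count.go]
      by_cases hc : c = a
      · subst hc
        simp only [List.isPrefixOf, Bool.and_true, beq_self_eq_true, if_true,
          List.length_singleton, List.drop_succ_cons, List.drop_zero]
        simp only [List.length_cons] at h
        rw [ih n (acc+1) (by omega)]
        simp
        omega
      · have hp : ([c].isPrefixOf (a :: t)) = false := by
          simp [List.isPrefixOf, hc]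
        rw [hp]
        simp only [Bool.false_eq_true, if_false]
        simp only [List.length_cons] at h
        rw [ih n acc (by omega)]
        simp [Ne.symm hc]

theorem pv_count_single (cs : List Char) (c : Char) : PySem.Chars.count cs [c] = cs.count c := by
  simp only [PySem.Chars.count, List.isEmpty_cons, Bool.false_eq_true, if_false]
  rw [pv_go_single c cs cs.length 0 le_rfl]
  omega

-- ===== VERDICT (by name: the statement is the Claim_ definition above) =====
theorem find_first_non_repeating_vowel_spec : Claim_equal_find_first_non_repeating_vowel := by
  intro s _
  unfold Spec_find_first_non_repeating_vowel
  unfold find_first_non_repeating_vowel find_first_non_repeating_vowel_alt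
  simp only []
  rw [PySem.List.foldl_ite_eq_foldl_filter
        (p := fun ch => ch ∈ ['a', 'e', 'i', 'o', 'u'])
        (f := fun (acc : PySem.Dict Char Int × List Char) ch =>
          ((if acc.1.contains ch = false then acc.1.insert ch 1 else acc.1.modify ch 0 (· + 1)),
           (if ch ∈ acc.2 then acc.2 else acc.2 ++ [ch])))]
  rw [PySem.List.foldl_prod_mk
        (f := fun (d : PySem.Dict Char Int) ch =>
          if d.contains ch = false then d.insert ch 1 else d.modify ch 0 (· + 1))
        (g := fun (vs : List Char) ch => if ch ∈ vs then vs else vs ++ [ch])]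
  set vl := s.toList.filter (fun x => decide (x ∈ ['a', 'e', 'i', 'o', 'u'])) with hvl
  have hadd : (fun (vs : List Char) ch => if ch ∈ vs then vs else vs ++ [ch]) = PySem.Set.add := by
    funext vs ch
    rw [PySem.Set.add_eq_ite]
  have hpA : (fun v => (vl.foldl (fun (d : PySem.Dict Char Int) ch =>
        if d.contains ch = false then d.insert ch 1 else d.modify ch 0 (· + 1))
        PySem.Dict.empty).getD v 0 == 1) = fun v => ((vl.count v : Int) == 1) := by
    funext v
    rw [pv_countA]
    simp
  simp only [hadd, hpA, ← PySem.Set.ofList_eq_foldl]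
  rw [pv_find?_ofList]
  rw [pv_find?_filter_imp s.toList _ _ (fun y hy => by
    have h1 : vl.count y = 1 := by
      have := of_decide_eq_true hy
      omega
    have hm : y ∈ vl := List.count_pos_iff.mp (by omega)
    exact (List.mem_filter.mp hm).2)]
  have hpred : (fun y => ((vl.count y : Int) == 1))
      = (fun ch => decide (ch ∈ ['a', 'e', 'i', 'o', 'u'])
                   && (PySem.Str.count s (String.ofList [ch]) == 1)) := by
    funext y
    rw [PySem.Str.count_eq]
    simp only [String.toList_ofList]
    rw [pv_count_single]
    by_cases hv : y ∈ ['a', 'e', 'i', 'o', 'u']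
    · have hcnt : vl.count y = s.toList.count y := by
        rw [hvl]
        exact List.count_filter (by simpa using hv)
      simp [hv, hcnt]
    · have h0 : vl.count y = 0 := by
        rw [List.count_eq_zero]
        intro hm
        exact hv (by simpa using (List.mem_filter.mp hm).2)
      simp [hv, h0]
  rw [hpred]
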